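-- pv_equiv track=rewrite | github.com/TripleQuatre/SkategamePrototype1 | Skategame/cli/console.py | format_word_progress
-- ===== SOURCE A (Python) =====
-- def format_word_progress(word: str, score: int) -> str:
--     revealed = []
--
--     for index, letter in enumerate(word):
--         if index < score:
--             revealed.append(letter)
--         else:
--             revealed.append("_")
--
--     return " ".join(revealed)
-- ===== SOURCE B (Python) =====
-- def format_word_progress(word: str, score: int) -> str:
--     k = max(score, 0)
--     return " ".join(list(word[:k]) + ["_"] * (len(word) - k))
-- ===== Notes on version B (the rewrite author's own statement) =====
-- stated objective: simpler
-- what changed: Replaces the element-wise enumerate loop with per-index branching by two bulk segments: a clamped prefix slice word[:max(score,0)] plus a repeated-underscore list, joined once.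
import Mathlib
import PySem

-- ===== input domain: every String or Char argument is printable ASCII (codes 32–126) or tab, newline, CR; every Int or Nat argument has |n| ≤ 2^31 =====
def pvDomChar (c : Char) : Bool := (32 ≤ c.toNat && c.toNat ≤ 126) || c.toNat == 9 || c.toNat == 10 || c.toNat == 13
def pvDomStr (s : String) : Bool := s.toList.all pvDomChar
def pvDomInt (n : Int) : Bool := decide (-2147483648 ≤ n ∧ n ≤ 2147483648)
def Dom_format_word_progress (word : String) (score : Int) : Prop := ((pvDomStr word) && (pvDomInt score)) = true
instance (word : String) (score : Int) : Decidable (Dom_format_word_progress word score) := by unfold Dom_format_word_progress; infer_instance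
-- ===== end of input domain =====

-- B replaces A's per-character branching loop by two bulk segments (clamped prefix slice + repeated underscores); objective: simpler.

-- ===== PORT A =====
def format_word_progress (word : String) (score : Int) : String :=
  PySem.Str.join " "
    ((PySem.List.enumerate word.toList 0).foldl
      (fun acc p => if p.1 < score then acc ++ [String.ofList [p.2]] else acc ++ ["_"]) [])

-- ===== PORT B =====
def format_word_progress_alt (word : String) (score : Int) : String :=
  PySem.Str.join " "
    (((PySem.Str.slice word none (some (max score 0))).toList.map (fun c => String.ofList [c]))
      ++ PySem.List.pyRepeat ["_"] (PySem.Str.len word - max score 0))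

-- ===== PRECONDITION & SPEC =====
def Spec_format_word_progress (word : String) (score : Int) (out : String) : Prop := out = format_word_progress_alt word score
instance (word : String) (score : Int) (out : String) : Decidable (Spec_format_word_progress word score out) := by unfold Spec_format_word_progress; infer_instance

-- ===== CLAIM (what is proved, stated in full; the proofs are below) =====
def Claim_equal_format_word_progress : Prop := ∀ (word : String) (score : Int), Dom_format_word_progress word score → Spec_format_word_progress word score (format_word_progress word score)

-- ===== LEMMAS AND PROOFS =====

lemma fwp_enum_map (score : Int) (cs : List Char) (s : Int) :
    (PySem.List.enumerate cs s).map (fun p => if p.1 < score then String.ofList [p.2] else "_")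
      = (cs.take (score - s).toNat).map (fun c => String.ofList [c])
        ++ List.replicate (cs.length - (score - s).toNat) "_" := by
  induction cs generalizing s with
  | nil => simp
  | cons c cs ih =>
    rw [PySem.List.enumerate_cons]
    simp only [List.map_cons]
    rw [ih (s + 1)]
    by_cases h : s < score
    · have h1 : (score - s).toNat = (score - (s + 1)).toNat + 1 := by omega
      have h2 : (c :: cs).length - (score - s).toNat
          = cs.length - (score - (s + 1)).toNat := by
        simp [List.length_cons]; omega
      have h2' : (c :: cs).length - ((score - (s + 1)).toNat + 1)
          = cs.length - (score - (s + 1)).toNat := by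
        simp only [List.length_cons]; omega
      rw [h1, List.take_succ_cons, h2']
      simp [h]
    · have h1 : (score - s).toNat = 0 := by omega
      have h2 : (score - (s + 1)).toNat = 0 := by omega
      have h3 : (c :: cs).length - 0 = cs.length - 0 + 1 := by simp
      rw [h1, h2, h3, List.replicate_succ]
      simp [h]

-- ===== VERDICT (by name: the statement is the Claim_ definition above) =====
theorem format_word_progress_spec : Claim_equal_format_word_progress := by
  intro word score _
  show _ = _
  unfold format_word_progress format_word_progress_alt
  have hk : (0:Int) ≤ max score 0 := le_max_right _ _
  have step : (PySem.List.enumerate word.toList 0).foldl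
      (fun acc p => if p.1 < score then acc ++ [String.ofList [p.2]] else acc ++ ["_"]) []
      = (PySem.List.enumerate word.toList 0).foldl
        (fun acc p => acc ++ [if p.1 < score then String.ofList [p.2] else "_"]) [] :=
    by apply PySem.List.foldl_congr_mem; intro acc p _
       by_cases h : p.1 < score <;> simp [h]
  rw [step, PySem.List.foldl_append_singleton_eq_map, List.nil_append,
    fwp_enum_map score word.toList 0]
  have hlen : PySem.Str.len word = (word.toList.length : Int) := by simp
  have h1 : (score - 0).toNat = (max score 0).toNat := by omega
  have h2 : word.toList.length - (max score 0).toNat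
      = (PySem.Str.len word - max score 0).toNat := by omega
  rw [h1, h2, hlen] at *
  simp only [PySem.Str.toList_slice, PySem.List.pyRepeat_singleton]
  unfold PySem.Chars.slice
  rw [PySem.List.slice_to _ hk]
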